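-- pv_equiv track=rewrite | github.com/Itamarabir1/Linkup | backend/app/domain/events/routing.py | get_routing_metadata
-- ===== SOURCE A (Python) =====
-- from typing import Dict, Any, List
--
-- _EXCHANGE_BY_PREFIX: Dict[str, str] = {
--     "auth.": "user",
--     "user.": "user",
--     "ride.": "ride",
--     "booking.": "booking",
--     "chat.": "user",  # אירועי צ'אט הולכים ל-exchange "user" (אותו consumer של notifications)
-- }
--
-- DEFAULT_EXCHANGE = "system_events"
--
-- TASKS_EXCHANGE = "tasks"
--
-- _TASK_EVENT_NAMES: List[str] = [
--     "user.avatar_upload",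
--     "user.avatar_remove",
-- ]
--
-- def get_routing_metadata(event_name: str) -> Dict[str, Any]:
--     """
--     מחזיר metadata לשליחה ל-RabbitMQ: exchange ו-routing_key.
--     אירועי משימות (avatar_upload) → exchange "tasks"; שאר אירועים → לפי קידומת דומיין.
--     """
--     if event_name in _TASK_EVENT_NAMES:
--         return {"exchange": TASKS_EXCHANGE, "routing_key": event_name}
--     exchange = DEFAULT_EXCHANGE
--     for prefix, ex in _EXCHANGE_BY_PREFIX.items():
--         if event_name.startswith(prefix):
--             exchange = ex
--             break
--     return {
--         "exchange": exchange,
--         "routing_key": event_name,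
--     }
-- ===== SOURCE B (Python) =====
-- from typing import Dict, Any, List
--
-- _EXCHANGE_BY_PREFIX: Dict[str, str] = {
--     "auth.": "user",
--     "user.": "user",
--     "ride.": "ride",
--     "booking.": "booking",
--     "chat.": "user",
-- }
--
-- DEFAULT_EXCHANGE = "system_events"
--
-- TASKS_EXCHANGE = "tasks"
--
-- _TASK_EVENT_NAMES: List[str] = [
--     "user.avatar_upload",
--     "user.avatar_remove",
-- ]
--
-- def get_routing_metadata(event_name: str) -> Dict[str, Any]:
--     if event_name in _TASK_EVENT_NAMES:
--         return {"exchange": TASKS_EXCHANGE, "routing_key": event_name}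
--     # slice up to and including the first '.' (empty when there is none),
--     # then a single keyed lookup instead of a linear startswith scan
--     domain_key = event_name[: event_name.find(".") + 1]
--     return {
--         "exchange": _EXCHANGE_BY_PREFIX.get(domain_key, DEFAULT_EXCHANGE),
--         "routing_key": event_name,
--     }
-- ===== Notes on version B (the rewrite author's own statement) =====
-- stated objective: idiomatic
-- what changed: Replaced the linear startswith scan over the prefix table by slicing the event name up to and including the first dot and doing a single keyed dict lookup with a default.
import Mathlib
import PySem

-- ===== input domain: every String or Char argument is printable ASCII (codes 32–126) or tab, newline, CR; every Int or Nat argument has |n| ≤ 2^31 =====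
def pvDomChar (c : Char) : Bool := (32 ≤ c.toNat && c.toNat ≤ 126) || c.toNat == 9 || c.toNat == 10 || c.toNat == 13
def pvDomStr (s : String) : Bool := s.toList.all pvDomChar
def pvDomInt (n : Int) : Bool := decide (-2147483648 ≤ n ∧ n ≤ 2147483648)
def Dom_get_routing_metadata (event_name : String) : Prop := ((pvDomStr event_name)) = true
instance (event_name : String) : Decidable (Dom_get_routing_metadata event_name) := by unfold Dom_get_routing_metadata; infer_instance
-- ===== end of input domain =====

-- B replaces A's linear startswith scan over the prefix table by a single keyed
-- dict lookup on the slice up to and including the first '.' (idiomatic rewrite).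

-- module constants shared by both Pythons
def pvExchangeByPrefix : PySem.Dict String String :=
  PySem.Dict.ofList
    [("auth.", "user"), ("user.", "user"), ("ride.", "ride"),
     ("booking.", "booking"), ("chat.", "user")]

def pvDefaultExchange : String := "system_events"

def pvTasksExchange : String := "tasks"

def pvTaskEventNames : List String := ["user.avatar_upload", "user.avatar_remove"]

-- ===== PORT A =====
-- the 'for prefix, ex in ….items(): if event_name.startswith(prefix): exchange = ex; break' loop
def pvScanA : List (String × String) → String → String → String
  | [], _, exchange => exchange
  | (pfx, ex) :: rest, event_name, exchange =>
    if PySem.Str.startswith event_name pfx then ex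
    else pvScanA rest event_name exchange

def get_routing_metadata (event_name : String) : List (String × String) :=
  if event_name ∈ pvTaskEventNames then
    [("exchange", pvTasksExchange), ("routing_key", event_name)]
  else
    let exchange := pvScanA pvExchangeByPrefix.items event_name pvDefaultExchange
    [("exchange", exchange), ("routing_key", event_name)]

-- ===== PORT B =====
def get_routing_metadata_alt (event_name : String) : List (String × String) :=
  if event_name ∈ pvTaskEventNames then
    [("exchange", pvTasksExchange), ("routing_key", event_name)]
  else
    let domain_key := PySem.Str.slice event_name none (some (PySem.Str.find event_name "." + 1))
    [("exchange", PySem.Dict.getD pvExchangeByPrefix domain_key pvDefaultExchange),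
     ("routing_key", event_name)]

-- ===== PRECONDITION & SPEC =====
def Spec_get_routing_metadata (event_name : String) (out : List (String × String)) : Prop := out = get_routing_metadata_alt event_name
instance (event_name : String) (out : List (String × String)) : Decidable (Spec_get_routing_metadata event_name out) := by unfold Spec_get_routing_metadata; infer_instance

-- ===== CLAIM (what is proved, stated in full; the proofs are below) =====
def Claim_equal_get_routing_metadata : Prop := ∀ (event_name : String), Dom_get_routing_metadata event_name → Spec_get_routing_metadata event_name (get_routing_metadata event_name)

-- ===== LEMMAS AND PROOFS =====

theorem pv_singleton_prefix {a : Char} {l : List Char} :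
    [a] <+: l ↔ ∃ t, l = a :: t := by
  constructor
  · rintro ⟨t, ht⟩; exact ⟨t, ht.symm⟩
  · rintro ⟨t, rfl⟩; exact ⟨t, rfl⟩

-- first '.' is at index k  ⇒  a dot-terminated dot-free prefix matches iff it is take (k+1)
theorem pv_pref_char {cs q : List Char} {k : Nat}
    (hd : ['.'] <+: cs.drop k) (hmin : ∀ i < k, ¬ ['.'] <+: cs.drop i)
    (hq : '.' ∉ q) :
    (q ++ ['.']) <+: cs ↔ cs.take (k + 1) = q ++ ['.'] := by
  constructor
  · rintro ⟨t, ht⟩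
    have hcs : cs = q ++ '.' :: t := by simpa using ht.symm
    subst hcs
    have hlen : q.length = k := by
      rcases Nat.lt_trichotomy q.length k with hlt | heq | hgt
      · exfalso
        apply hmin q.length hlt
        refine pv_singleton_prefix.mpr ⟨t, ?_⟩
        simp
      · exact heq
      · exfalso
        obtain ⟨r, hr⟩ := pv_singleton_prefix.mp hd
        have hdrop : (q ++ '.' :: t).drop k = q.drop k ++ '.' :: t := by
          rw [List.drop_append]
          have : k - q.length = 0 := by omega
          simp [this]
        have hqk : q.drop k = q[k] :: q.drop (k + 1) := List.drop_eq_getElem_cons hgt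
        rw [hdrop, hqk, List.cons_append] at hr
        have : q[k] = '.' := (List.cons_eq_cons.mp hr).1
        exact hq (this ▸ List.getElem_mem hgt)
    rw [List.take_append]
    have h1 : q.take (k + 1) = q := List.take_of_length_le (by omega)
    have h2 : k + 1 - q.length = 1 := by omega
    simp [h1, h2]
  · intro h
    exact h ▸ List.take_prefix (k + 1) cs

-- the dict literal in explicit item form
theorem pv_dict_items : pvExchangeByPrefix = PySem.Dict.mk
    [("auth.", "user"), ("user.", "user"), ("ride.", "ride"),
     ("booking.", "booking"), ("chat.", "user")] := by decide

theorem pv_getD_none {s : String}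
    (h1 : s ≠ "auth.") (h2 : s ≠ "user.") (h3 : s ≠ "ride.")
    (h4 : s ≠ "booking.") (h5 : s ≠ "chat.") :
    PySem.Dict.getD pvExchangeByPrefix s pvDefaultExchange = pvDefaultExchange := by
  rw [pv_dict_items]
  simp [PySem.Dict.getD, beq_iff_eq,
    Ne.symm h1, Ne.symm h2, Ne.symm h3, Ne.symm h4, Ne.symm h5, PySem.Dict.get?]

theorem get_routing_metadata_spec_aux (event_name : String) :
    get_routing_metadata event_name = get_routing_metadata_alt event_name := by
  unfold get_routing_metadata get_routing_metadata_alt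
  by_cases htask : event_name ∈ pvTaskEventNames
  · simp [htask]
  · simp only [htask, if_false]
    set dk := PySem.Str.slice event_name none
      (some (PySem.Str.find event_name "." + 1)) with hdk
    have hfind : PySem.Str.find event_name "." = PySem.Chars.find event_name.toList ['.'] := by
      simp [PySem.Str.find_eq]
    have hge : (-1 : Int) ≤ PySem.Chars.find event_name.toList ['.'] :=
      PySem.Chars.neg_one_le_find event_name.toList ['.']
    have hkey : dk.toList
        = event_name.toList.take (PySem.Chars.find event_name.toList ['.'] + 1).toNat := by
      rw [hdk, hfind]
      simp [PySem.Str.slice, PySem.Chars.slice, PySem.List.slice_to _ (by omega :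
        (0 : Int) ≤ PySem.Chars.find event_name.toList ['.'] + 1)]
    by_cases hpos : (0 : Int) ≤ PySem.Chars.find event_name.toList ['.']
    · -- there is a '.'; k = index of the first one
      obtain ⟨hd, hmin⟩ := PySem.Chars.find_spec hpos
      set k := (PySem.Chars.find event_name.toList ['.']).toNat with hk
      have hkn : (PySem.Chars.find event_name.toList ['.'] + 1).toNat = k + 1 := by omega
      rw [hkn] at hkey
      have hiff : ∀ (p : String) (q : List Char), p.toList = q ++ ['.'] → '.' ∉ q →
          (PySem.Str.startswith event_name p = true ↔ dk = p) := by
        intro p q hp hqn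
        rw [PySem.Str.startswith_eq, PySem.Chars.startswith_iff, hp,
          pv_pref_char hd hmin hqn, ← hp, ← hkey]
        exact ⟨fun h => String.toList_inj.mp h, fun h => by rw [h]⟩
      have i1 := hiff "auth." ['a','u','t','h'] (by decide) (by decide)
      have i2 := hiff "user." ['u','s','e','r'] (by decide) (by decide)
      have i3 := hiff "ride." ['r','i','d','e'] (by decide) (by decide)
      have i4 := hiff "booking." ['b','o','o','k','i','n','g'] (by decide) (by decide)
      have i5 := hiff "chat." ['c','h','a','t'] (by decide) (by decide)
      by_cases c1 : PySem.Str.startswith event_name "auth." = true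
      · have c1' : PySem.Chars.startswith event_name.toList ['a','u','t','h','.'] = true := by
          simpa using c1
        rw [i1.mp c1]
        simp [pvScanA, c1', pv_dict_items, PySem.Dict.getD, PySem.Dict.get?]
      have c1' : PySem.Chars.startswith event_name.toList ['a','u','t','h','.'] = false := by
        simpa using c1
      by_cases c2 : PySem.Str.startswith event_name "user." = true
      · have c2' : PySem.Chars.startswith event_name.toList ['u','s','e','r','.'] = true := by
          simpa using c2
        rw [i2.mp c2]
        simp [pvScanA, c1', c2', pv_dict_items, PySem.Dict.getD, PySem.Dict.get?]
      have c2' : PySem.Chars.startswith event_name.toList ['u','s','e','r','.'] = false := by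
        simpa using c2
      by_cases c3 : PySem.Str.startswith event_name "ride." = true
      · have c3' : PySem.Chars.startswith event_name.toList ['r','i','d','e','.'] = true := by
          simpa using c3
        rw [i3.mp c3]
        simp [pvScanA, c1', c2', c3', pv_dict_items, PySem.Dict.getD, PySem.Dict.get?]
      have c3' : PySem.Chars.startswith event_name.toList ['r','i','d','e','.'] = false := by
        simpa using c3
      by_cases c4 : PySem.Str.startswith event_name "booking." = true
      · have c4' : PySem.Chars.startswith event_name.toList ['b','o','o','k','i','n','g','.'] = true := by
          simpa using c4
        rw [i4.mp c4]
        simp [pvScanA, c1', c2', c3', c4', pv_dict_items, PySem.Dict.getD, PySem.Dict.get?]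
      have c4' : PySem.Chars.startswith event_name.toList ['b','o','o','k','i','n','g','.'] = false := by
        simpa using c4
      by_cases c5 : PySem.Str.startswith event_name "chat." = true
      · have c5' : PySem.Chars.startswith event_name.toList ['c','h','a','t','.'] = true := by
          simpa using c5
        rw [i5.mp c5]
        simp [pvScanA, c1', c2', c3', c4', c5', pv_dict_items, PySem.Dict.getD, PySem.Dict.get?]
      · have c5' : PySem.Chars.startswith event_name.toList ['c','h','a','t','.'] = false := by
          simpa using c5
        have hnone := pv_getD_none (fun h => c1 (i1.mpr h)) (fun h => c2 (i2.mpr h))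
          (fun h => c3 (i3.mpr h)) (fun h => c4 (i4.mpr h)) (fun h => c5 (i5.mpr h))
        rw [pv_dict_items] at hnone
        simp [pvScanA, pv_dict_items, c1', c2', c3', c4', c5', hnone]
    · -- no '.' anywhere: the scan finds nothing and the key is ""
      have hfe : PySem.Chars.find event_name.toList ['.'] = -1 := by omega
      have hni : ¬ (['.'] <:+: event_name.toList) :=
        (PySem.Chars.find_eq_neg_one_iff _ _).mp hfe
      have hdk0 : dk = "" := by
        apply String.toList_inj.mp
        rw [hkey, hfe]
        simp
      have hsw : ∀ p : String, ['.'] <:+: p.toList →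
          PySem.Chars.startswith event_name.toList p.toList = false := by
        intro p hpin
        rw [← PySem.Str.startswith_eq]
        by_contra hsp
        rw [Bool.not_eq_false, PySem.Str.startswith_eq, PySem.Chars.startswith_iff] at hsp
        exact hni (hpin.trans hsp.isInfix)
      have s1 : PySem.Chars.startswith event_name.toList ['a','u','t','h','.'] = false := by
        simpa using hsw "auth." (by decide)
      have s2 : PySem.Chars.startswith event_name.toList ['u','s','e','r','.'] = false := by
        simpa using hsw "user." (by decide)
      have s3 : PySem.Chars.startswith event_name.toList ['r','i','d','e','.'] = false := by
        simpa using hsw "ride." (by decide)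
      have s4 : PySem.Chars.startswith event_name.toList ['b','o','o','k','i','n','g','.'] = false := by
        simpa using hsw "booking." (by decide)
      have s5 : PySem.Chars.startswith event_name.toList ['c','h','a','t','.'] = false := by
        simpa using hsw "chat." (by decide)
      rw [hdk0]
      simp [pvScanA, pv_dict_items, s1, s2, s3, s4, s5, PySem.Dict.getD, PySem.Dict.get?]

-- ===== VERDICT (by name: the statement is the Claim_ definition above) =====
theorem get_routing_metadata_spec : Claim_equal_get_routing_metadata := by
  intro event_name _
  unfold Spec_get_routing_metadata
  exact get_routing_metadata_spec_aux event_name
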